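-- pv_equiv track=rewrite | github.com/anas9244/linguistic_geo | geolocation_code/langdistance.py | _get_word_set
-- ===== SOURCE A (Python) =====
-- def _get_word_set(subsets_words):
--     """ Generates a set of word types that are common across all subsets """
--     word_set = set()
--     for index, subset in enumerate(subsets_words):
--         if index == 0:
--             for word in subsets_words[subset]:
--                 word_set.add(word)
--         else:
--             set2 = set()
--             for word in subsets_words[subset]:
--                 set2.add(word)
--             word_set = word_set.intersection(set2)
--     return word_set
-- ===== SOURCE B (Python) =====
-- def _get_word_set(subsets_words):
--     """ Generates a set of word types that are common across all subsets """
--     n = len(subsets_words)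
--     counts = {}
--     for words in subsets_words.values():
--         for w in dict.fromkeys(words):
--             counts[w] = counts.get(w, 0) + 1
--     first = next(iter(subsets_words.values()), [])
--     return {w for w in dict.fromkeys(first) if counts.get(w, 0) == n}
-- ===== Notes on version B (the rewrite author's own statement) =====
-- stated objective: alternative
-- what changed: Instead of repeatedly intersecting a shrinking accumulator set subset-by-subset, B counts in one dict how many subsets each word occurs in (deduplicating each subset first) and returns the words of the first subset whose count equals the number of subsets.
import Mathlib
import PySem

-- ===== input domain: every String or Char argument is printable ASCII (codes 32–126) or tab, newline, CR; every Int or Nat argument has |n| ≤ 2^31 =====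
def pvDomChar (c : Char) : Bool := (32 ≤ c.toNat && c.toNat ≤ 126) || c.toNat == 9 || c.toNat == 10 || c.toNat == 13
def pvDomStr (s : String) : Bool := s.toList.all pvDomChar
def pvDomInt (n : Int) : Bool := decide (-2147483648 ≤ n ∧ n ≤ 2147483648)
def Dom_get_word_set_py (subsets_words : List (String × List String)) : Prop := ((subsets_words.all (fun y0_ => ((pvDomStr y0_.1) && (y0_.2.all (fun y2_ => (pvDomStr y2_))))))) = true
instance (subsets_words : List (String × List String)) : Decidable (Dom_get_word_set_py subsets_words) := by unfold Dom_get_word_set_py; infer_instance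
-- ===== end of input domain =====

-- B replaces A's accumulate-then-intersect loop by a single counting dict (how many subsets
-- contain each word) plus a filter of the first subset's words; same cost, different algorithm.
-- The association list stands for a Python dict, so Pre_ requires its keys to be distinct.

-- ===== PORT A =====
def get_word_set_py (subsets_words : List (String × List String)) : List String :=
  let d := PySem.Dict.mk subsets_words
  (PySem.List.enumerate (PySem.Dict.keys d)).foldl
    (fun word_set iv =>
      if iv.1 == 0 then
        (PySem.Dict.getD d iv.2 []).foldl (fun s w => PySem.Set.add s w) word_set
      else
        let set2 := (PySem.Dict.getD d iv.2 []).foldl (fun s w => PySem.Set.add s w) PySem.Set.empty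
        PySem.Set.inter word_set set2)
    PySem.Set.empty

-- ===== PORT B =====
def get_word_set_py_alt (subsets_words : List (String × List String)) : List String :=
  let d := PySem.Dict.mk subsets_words
  let n : Int := PySem.Dict.size d
  let counts := (PySem.Dict.values d).foldl
    (fun counts words =>
      (PySem.List.dedup words).foldl
        (fun c w => PySem.Dict.insert c w (PySem.Dict.getD c w 0 + 1)) counts)
    PySem.Dict.empty
  let first := (PySem.Dict.values d).headD []
  PySem.Set.ofList ((PySem.List.dedup first).filter (fun w => PySem.Dict.getD counts w 0 == n))

-- ===== PRECONDITION & SPEC =====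
-- Pre_ excludes association lists with duplicate keys: they do not represent a Python dict
-- (A's input type), and A's repeated first-match lookup there is accidental.
def Pre_get_word_set_py (subsets_words : List (String × List String)) : Prop :=
  (subsets_words.map Prod.fst).Nodup
instance (subsets_words : List (String × List String)) : Decidable (Pre_get_word_set_py subsets_words) := by unfold Pre_get_word_set_py; infer_instance

def pvWitness_get_word_set_py : (List (String × List String)) :=
  [("a", ["x", "y", "x"]), ("b", ["y", "z"])]

def Spec_get_word_set_py (subsets_words : List (String × List String)) (out : List String) : Prop := out = get_word_set_py_alt subsets_words
instance (subsets_words : List (String × List String)) (out : List String) : Decidable (Spec_get_word_set_py subsets_words out) := by unfold Spec_get_word_set_py; infer_instance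

-- ===== CLAIM (what is proved, stated in full; the proofs are below) =====
def Claim_equal_get_word_set_py : Prop := ∀ (subsets_words : List (String × List String)), Dom_get_word_set_py subsets_words → Pre_get_word_set_py subsets_words → Spec_get_word_set_py subsets_words (get_word_set_py subsets_words)

-- ===== LEMMAS AND PROOFS =====

-- A's inner 'for word: set.add(word)' loop is Set.update.
theorem foldl_add_eq_update {α : Type} [BEq α] (s : PySem.Set α) (xs : List α) :
    xs.foldl (fun s w => PySem.Set.add s w) s = PySem.Set.update s xs := rfl

-- intersecting with each subset in turn = one filter by membership in all of them
theorem foldl_inter_eq_filter (ps : List (String × List String)) (s : PySem.Set String) :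
    ps.foldl (fun ws p => PySem.Set.inter ws (PySem.Set.ofList p.2)) s
      = s.filter (fun w => ps.all (fun p => decide (w ∈ p.2))) := by
  induction ps generalizing s with
  | nil => simp
  | cons p t ih =>
      rw [List.foldl_cons, ih, PySem.Set.inter, List.filter_filter]
      apply List.filter_congr
      intro w _
      simp only [List.all_cons]
      by_cases h : w ∈ p.2 <;> simp [h]

-- the counting loop counts, for each word, the number of word-lists containing it
theorem counts_spec (vs : List (List String)) (d : PySem.Dict String Int) (w : String) :
    (vs.foldl (fun counts words =>
        (PySem.Set.ofList words).foldl
          (fun c x => PySem.Dict.insert c x (PySem.Dict.getD c x 0 + 1)) counts) d).getD w 0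
      = d.getD w 0 + (vs.countP (fun ws => decide (w ∈ ws)) : Int) := by
  induction vs generalizing d with
  | nil => simp
  | cons v t ih =>
      simp only [List.foldl_cons, ih, PySem.Dict.getD_foldl_insert_add_one]
      by_cases h : w ∈ v
      · rw [List.count_eq_one_of_mem (PySem.Set.nodup_ofList v) ((PySem.Set.mem_ofList v w).mpr h)]
        simp [h]
        ring
      · rw [List.count_eq_zero.mpr (fun hc => h ((PySem.Set.mem_ofList v w).mp hc))]
        simp [h]

-- A's loop over the non-first subsets (indices ≥ 1) is a plain intersection fold
theorem tail_fold (d : PySem.Dict String (List String))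
    (ps : List (String × List String)) (i : Int) (hi : 1 ≤ i)
    (h : ∀ p ∈ ps, PySem.Dict.getD d p.1 [] = p.2) (acc : PySem.Set String) :
    (PySem.List.enumerate (ps.map Prod.fst) i).foldl
      (fun word_set iv =>
        if iv.1 == 0 then
          (PySem.Dict.getD d iv.2 []).foldl (fun s w => PySem.Set.add s w) word_set
        else
          PySem.Set.inter word_set
            ((PySem.Dict.getD d iv.2 []).foldl (fun s w => PySem.Set.add s w) PySem.Set.empty)) acc
    = ps.foldl (fun ws p => PySem.Set.inter ws (PySem.Set.ofList p.2)) acc := by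
  induction ps generalizing i acc with
  | nil => rfl
  | cons p t ih =>
      simp only [List.map_cons, PySem.List.enumerate, List.foldl_cons]
      have hne : (i == 0) = false := by simp; omega
      rw [hne]
      simp only [Bool.false_eq_true, if_false]
      rw [h p (by simp), foldl_add_eq_update, PySem.Set.update_empty]
      exact ih (i + 1) (by omega) (fun q hq => h q (by simp [hq])) _

theorem get_word_set_py_spec : Claim_equal_get_word_set_py := by
  intro sw _ hpre
  unfold Spec_get_word_set_py
  match sw with
  | [] => rfl
  | (k0, v0) :: rest =>
    unfold get_word_set_py get_word_set_py_alt
    simp only []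
    rw [PySem.Dict.keys_mk, List.map_cons]
    simp only [PySem.List.enumerate, List.foldl_cons]
    have hnd : (PySem.Dict.mk ((k0, v0) :: rest)).keys.Nodup := by
      rw [PySem.Dict.keys_mk]; exact hpre
    have hget : ∀ p ∈ rest, (PySem.Dict.mk ((k0, v0) :: rest)).getD p.1 [] = p.2 := by
      intro p hp
      exact PySem.Dict.getD_of_mem_items _ (List.mem_cons_of_mem _ (by simpa using hp)) hnd []
    rw [tail_fold (PySem.Dict.mk ((k0, v0) :: rest)) rest (0 + 1) (by omega) hget]
    have hk0 : (PySem.Dict.mk ((k0, v0) :: rest)).getD k0 [] = v0 := by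
      simp [PySem.Dict.getD_eq_get?_getD, PySem.Dict.get?_mk_cons]
    simp only [beq_self_eq_true, if_true, hk0, foldl_add_eq_update, PySem.Set.update_empty,
      foldl_inter_eq_filter]
    rw [PySem.Dict.values_mk]
    simp only [List.map_cons, List.headD_cons, PySem.List.dedup_eq_ofList]
    simp only [counts_spec]
    rw [PySem.Set.ofList_eq_self_of_nodup _ (List.Nodup.filter _ (PySem.Set.nodup_ofList v0))]
    apply List.filter_congr
    intro w hw
    have hwv : w ∈ v0 := (PySem.Set.mem_ofList v0 w).mp hw
    rw [List.countP_cons_of_pos (l := List.map (fun x => x.2) rest) (p := fun ws => decide (w ∈ ws)) (by simpa using hwv)]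
    rw [PySem.Dict.getD_empty, Bool.eq_iff_iff]
    simp only [List.all_eq_true, beq_iff_eq, List.countP_map, Function.comp_def,
      PySem.Dict.size, List.length_cons]
    have hiff := List.countP_eq_length (l := rest) (p := fun p => decide (w ∈ p.2))
    have hle := List.countP_le_length (p := fun p => decide (w ∈ p.2)) (l := rest)
    constructor
    · intro hall
      have hc : List.countP (fun p => decide (w ∈ p.2)) rest = rest.length := hiff.mpr hall
      push_cast
      omega
    · intro hEq
      push_cast at hEq
      exact hiff.mp (by omega)
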